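-- pv_equiv track=rewrite | github.com/pepedrog/Gema | algoritmos/fecho_convexo/mergehull.py | get_shell
-- ===== SOURCE A (Python) =====
-- def get_shell(h, ini, fim):
--     """ Devolve a concha externa do fecho h[ini..fim] """
--     H = []
--     i = ini
--     while i != fim:
--         H.append(h[i])
--         i = (i + 1)%len(h)
--     H.append(h[fim])
--     return H
-- ===== SOURCE B (Python) =====
-- def get_shell(h, ini, fim):
--     """ Devolve a concha externa do fecho h[ini..fim] """
--     n = len(h)
--     i = ini % n
--     f = fim % n
--     if i <= f:
--         return list(h[i:f+1])
--     return list(h[i:]) + list(h[:f+1])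
-- ===== Notes on version B (the rewrite author's own statement) =====
-- stated objective: simpler
-- what changed: Replaces the element-by-element walk with (i+1)%len(h) by a single wrap/no-wrap branch that copies one or two contiguous slices (after normalizing both endpoints modulo len(h)).
-- outside the precondition, e.g. on get_shell([1, 2, 3], -1, 2): A returns [3, 1, 2, 3], B returns [3]
import Mathlib
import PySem

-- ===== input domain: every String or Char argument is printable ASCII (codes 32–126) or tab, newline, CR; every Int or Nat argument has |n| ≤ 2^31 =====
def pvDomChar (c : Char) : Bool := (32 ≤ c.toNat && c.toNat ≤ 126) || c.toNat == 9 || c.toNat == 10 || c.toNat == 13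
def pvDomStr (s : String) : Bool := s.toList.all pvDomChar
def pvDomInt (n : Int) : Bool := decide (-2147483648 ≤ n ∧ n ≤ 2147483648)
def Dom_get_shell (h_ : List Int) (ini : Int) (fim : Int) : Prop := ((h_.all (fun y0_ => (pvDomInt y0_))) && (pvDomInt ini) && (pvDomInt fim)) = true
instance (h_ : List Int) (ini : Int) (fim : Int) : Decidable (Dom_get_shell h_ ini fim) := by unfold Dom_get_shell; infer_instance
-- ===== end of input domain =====

-- B replaces A's step-by-step modular walk with a wrap/no-wrap branch copying one or two contiguous slices (objective: simpler).


-- ===== PORT A =====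
-- h[i] (IndexError = none, excluded by Pre_); default 0 is never used inside Pre_
def pvGetA (h : List Int) (i : Int) : Int := (PySem.List.pyGet? h i).getD 0

-- the while loop; fuel (length+1 at the call site) only makes the recursion total — inside
-- Pre_ the loop performs at most length steps, so fuel is never exhausted
def pvLoopA (h : List Int) (fim : Int) : Nat → Int → List Int → List Int
  | 0, _, H => H
  | fuel + 1, i, H =>
    if i = fim then H ++ [pvGetA h fim]
    else pvLoopA h fim fuel (PySem.Int.mod (i + 1) (h.length : Int)) (H ++ [pvGetA h i])

def get_shell (h_ : List Int) (ini : Int) (fim : Int) : List Int :=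
  pvLoopA h_ fim (h_.length + 1) ini []

-- ===== PORT B =====
def get_shell_alt (h_ : List Int) (ini : Int) (fim : Int) : List Int :=
  let n : Int := h_.length
  let i := PySem.Int.mod ini n
  let f := PySem.Int.mod fim n
  if i ≤ f then PySem.List.slice h_ (some i) (some (f + 1))
  else PySem.List.slice h_ (some i) none ++ PySem.List.slice h_ none (some (f + 1))

-- ===== PRECONDITION & SPEC =====
-- Pre_ requires a non-empty list with ini a valid Python index and fim either a nonnegative
-- valid index or equal to ini (otherwise A raises or loops forever); it also excludes the
-- ambiguous wrap corner ini = fim - len(h_), where ini and fim name the same position yet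
-- compare unequal, so A walks the whole circle duplicating the endpoint while B returns the
-- single element — both defensible readings of an inclusive circular range.
def Pre_get_shell (h_ : List Int) (ini : Int) (fim : Int) : Prop :=
  0 < h_.length ∧ -(h_.length : Int) ≤ ini ∧ ini < (h_.length : Int) ∧
  (0 ≤ fim ∧ fim < (h_.length : Int) ∨ ini = fim) ∧ ini ≠ fim - (h_.length : Int)
instance (h_ : List Int) (ini : Int) (fim : Int) : Decidable (Pre_get_shell h_ ini fim) := by
  unfold Pre_get_shell; infer_instance

def pvWitness_get_shell : List Int × Int × Int := ([1, 2, 3], 2, 1)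

def Spec_get_shell (h_ : List Int) (ini : Int) (fim : Int) (out : List Int) : Prop := out = get_shell_alt h_ ini fim
instance (h_ : List Int) (ini : Int) (fim : Int) (out : List Int) : Decidable (Spec_get_shell h_ ini fim out) := by unfold Spec_get_shell; infer_instance

-- ===== CLAIM (what is proved, stated in full; the proofs are below) =====
def Claim_equal_get_shell : Prop := ∀ (h_ : List Int) (ini : Int) (fim : Int), Dom_get_shell h_ ini fim → Pre_get_shell h_ ini fim → Spec_get_shell h_ ini fim (get_shell h_ ini fim)

-- ===== LEMMAS AND PROOFS =====

-- the circular segment from position i to position f (inclusive), both already in [0, length)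
def pvSeg (h : List Int) (i f : Nat) : List Int :=
  if i ≤ f then (h.drop i).take (f + 1 - i) else h.drop i ++ h.take (f + 1)

-- number of loop iterations remaining before the final append
def pvDist (h : List Int) (i f : Nat) : Nat :=
  if i ≤ f then f - i else h.length - i + f

lemma pvDist_step (h : List Int) (i f : Nat) (hi : i < h.length) (hf : f < h.length)
    (hne : i ≠ f) : pvDist h ((i + 1) % h.length) f + 1 = pvDist h i f := by
  rcases Nat.lt_or_ge (i + 1) h.length with h1 | h1
  · rw [Nat.mod_eq_of_lt h1]
    unfold pvDist; split_ifs <;> omega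
  · have hin : i + 1 = h.length := by omega
    rw [hin, Nat.mod_self]
    unfold pvDist; split_ifs <;> omega

lemma pvSeg_step (h : List Int) (i f : Nat) (hi : i < h.length) (hf : f < h.length)
    (hne : i ≠ f) : pvSeg h i f = h[i] :: pvSeg h ((i + 1) % h.length) f := by
  rcases Nat.lt_or_ge (i + 1) h.length with h1 | h1
  · rw [Nat.mod_eq_of_lt h1]
    unfold pvSeg
    rcases Nat.lt_or_ge i f with hif | hif
    · rw [if_pos (by omega), if_pos (by omega), List.drop_eq_getElem_cons hi,
        show f + 1 - i = (f + 1 - (i + 1)) + 1 by omega, List.take_succ_cons]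
    · have : f < i := by omega
      rw [if_neg (by omega), if_neg (by omega), List.drop_eq_getElem_cons hi, List.cons_append]
  · have hin : i + 1 = h.length := by omega
    have hfi : f < i := by omega
    rw [hin, Nat.mod_self]
    unfold pvSeg
    rw [if_neg (by omega), if_pos (by omega), List.drop_eq_getElem_cons hi, hin,
      List.drop_length]
    simp

lemma pvGetA_nat (h : List Int) (f : Nat) (hf : f < h.length) : pvGetA h (f : Int) = h[f] := by
  simp [pvGetA, hf]

lemma pvLoopA_eq (h : List Int) (hn : 0 < h.length) :
    ∀ (d : Nat) (i f : Nat) (H : List Int) (fuel : Nat), i < h.length → f < h.length →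
      pvDist h i f = d → d + 1 ≤ fuel →
      pvLoopA h (f : Int) fuel (i : Int) H = H ++ pvSeg h i f := by
  intro d
  induction d with
  | zero =>
    intro i f H fuel hi hf hd hfuel
    have hif : i = f := by unfold pvDist at hd; split_ifs at hd <;> omega
    subst hif
    obtain ⟨fuel', rfl⟩ : ∃ k, fuel = k + 1 := ⟨fuel - 1, by omega⟩
    rw [pvLoopA, if_pos rfl, pvGetA_nat h i hi]
    unfold pvSeg
    rw [if_pos le_rfl, List.drop_eq_getElem_cons hi,
      show i + 1 - i = 1 by omega, List.take_succ_cons, List.take_zero]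
  | succ d ih =>
    intro i f H fuel hi hf hd hfuel
    have hne : i ≠ f := by
      intro hif; subst hif; unfold pvDist at hd; rw [if_pos le_rfl] at hd; omega
    obtain ⟨fuel', rfl⟩ : ∃ k, fuel = k + 1 := ⟨fuel - 1, by omega⟩
    rw [pvLoopA, if_neg (by exact_mod_cast hne)]
    have hmod : PySem.Int.mod ((i : Int) + 1) (h.length : Int)
        = (((i + 1) % h.length : Nat) : Int) := by
      rw [show ((i : Int) + 1) = (((i + 1 : Nat)) : Int) by push_cast; ring]
      exact PySem.Int.mod_natCast _ _
    rw [hmod, pvGetA_nat h i hi,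
      ih ((i + 1) % h.length) f (H ++ [h[i]]) fuel' (Nat.mod_lt _ hn) hf
        (by have := pvDist_step h i f hi hf hne; omega) (by omega),
      List.append_assoc, List.singleton_append, ← pvSeg_step h i f hi hf hne]

-- B, written through pvSeg on normalized natural indices
lemma alt_eq_seg (h : List Int) (hn : 0 < h.length) (i f : Nat)
    (hi : i < h.length) (hf : f < h.length) :
    get_shell_alt h (i : Int) (f : Int) = pvSeg h i f := by
  unfold get_shell_alt pvSeg
  have hmi : PySem.Int.mod (i : Int) (h.length : Int) = (i : Int) := by
    rw [PySem.Int.mod_natCast, Nat.mod_eq_of_lt hi]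
  have hmf : PySem.Int.mod (f : Int) (h.length : Int) = (f : Int) := by
    rw [PySem.Int.mod_natCast, Nat.mod_eq_of_lt hf]
  simp only [hmi, hmf]
  by_cases hle : i ≤ f
  · rw [if_pos (by exact_mod_cast hle), if_pos hle,
      show (f : Int) + 1 = ((f + 1 : Nat) : Int) by push_cast; ring,
      PySem.List.slice_natCast]
  · have hlt : f < i := by omega
    rw [if_neg (by push_cast; omega), if_neg (by omega),
      show (f : Int) + 1 = ((f + 1 : Nat) : Int) by push_cast; ring,
      PySem.List.slice_from_natCast, PySem.List.slice_to_natCast]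

-- normalizing the (possibly negative) Python indices
lemma mod_norm (n : Nat) (hn : 0 < n) (x : Int) (hlo : -(n : Int) ≤ x) (hhi : x < (n : Int)) :
    PySem.Int.mod x (n : Int) = if 0 ≤ x then x else x + n := by
  rw [PySem.Int.mod_eq_emod_of_pos (by exact_mod_cast hn)]
  split_ifs with h0
  · exact Int.emod_eq_of_lt h0 hhi
  · rw [← Int.add_emod_right]
    exact Int.emod_eq_of_lt (by omega) (by omega)

lemma pyGet_norm (h : List Int) (hn : 0 < h.length) (x : Int)
    (hlo : -(h.length : Int) ≤ x) (hhi : x < (h.length : Int)) :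
    pvGetA h x = h.getD (if 0 ≤ x then x else x + h.length).toNat 0 := by
  split_ifs with h0
  · obtain ⟨m, rfl⟩ : ∃ m : Nat, x = (m : Int) := ⟨x.toNat, by omega⟩
    have hm : m < h.length := by exact_mod_cast hhi
    rw [pvGetA_nat h m hm, Int.toNat_natCast, List.getD_eq_getElem _ _ hm]
  · obtain ⟨k, rfl⟩ : ∃ k : Nat, x = -(k : Int) := ⟨(-x).toNat, by omega⟩
    have hk1 : 0 < k := by omega
    have hk2 : k ≤ h.length := by omega
    have hlt : h.length - k < h.length := by omega
    simp only [pvGetA, PySem.List.pyGet?_neg_natCast h k hk1 hk2,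
      List.getElem?_eq_getElem hlt, Option.getD_some]
    have ht : (-(k : Int) + h.length).toNat = h.length - k := by omega
    rw [ht, List.getD_eq_getElem _ _ hlt]

-- ===== VERDICT (by name: the statement is the Claim_ definition above) =====
theorem get_shell_spec : Claim_equal_get_shell := by
  intro h_ ini fim _ hpre
  obtain ⟨hn, hlo, hhi, hfim, hwrap⟩ := hpre
  unfold Spec_get_shell get_shell
  rcases hfim with ⟨hf0, hf1⟩ | heq
  · -- fim is a nonnegative valid index
    set f : Nat := fim.toNat with hfdef
    have hfcast : fim = (f : Int) := by omega
    have hf : f < h_.length := by omega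
    by_cases h0 : 0 ≤ ini
    · -- ini nonnegative: pure loop lemma
      set i : Nat := ini.toNat with hidef
      have hicast : ini = (i : Int) := by omega
      have hi : i < h_.length := by omega
      have hdlt : pvDist h_ i f + 1 ≤ h_.length + 1 := by
        unfold pvDist; split_ifs <;> omega
      rw [hicast, hfcast, pvLoopA_eq h_ hn (pvDist h_ i f) i f [] (h_.length + 1) hi hf rfl hdlt,
        List.nil_append, alt_eq_seg h_ hn i f hi hf]
    · -- ini negative: unfold one loop step, then the loop lemma from (ini + n)
      set i0 : Nat := (ini + h_.length).toNat with hi0def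
      have hi0cast : ini = (i0 : Int) - h_.length := by omega
      have hi0 : i0 < h_.length := by omega
      have hne0 : i0 ≠ f := by omega
      rw [pvLoopA, if_neg (by omega)]
      have hmod : PySem.Int.mod (ini + 1) (h_.length : Int)
          = (((i0 + 1) % h_.length : Nat) : Int) := by
        rw [show ini + 1 = ((i0 + 1 : Nat) : Int) - h_.length by omega,
          PySem.Int.mod_eq_emod_of_pos (by exact_mod_cast hn),
          show ((i0 + 1 : Nat) : Int) - h_.length
            = ((i0 + 1 : Nat) : Int) + (-1) * h_.length by ring,
          Int.add_mul_emod_self_right, ← PySem.Int.mod_eq_emod_of_pos (by exact_mod_cast hn),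
          PySem.Int.mod_natCast]
      have hget : pvGetA h_ ini = h_[i0]'hi0 := by
        rw [pyGet_norm h_ hn ini hlo hhi, if_neg h0, ← hi0def,
          List.getD_eq_getElem _ _ hi0]
      have hi1 : (i0 + 1) % h_.length < h_.length := Nat.mod_lt _ hn
      have hdlt : pvDist h_ ((i0 + 1) % h_.length) f + 1 ≤ h_.length := by
        have := pvDist_step h_ i0 f hi0 hf hne0
        unfold pvDist at *; split_ifs at * <;> omega
      rw [hmod, hget, hfcast,
        pvLoopA_eq h_ hn (pvDist h_ ((i0 + 1) % h_.length) f) ((i0 + 1) % h_.length) f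
          ([] ++ [h_[i0]'hi0]) h_.length hi1 hf rfl hdlt,
        List.nil_append, List.singleton_append, ← pvSeg_step h_ i0 f hi0 hf hne0,
        show ini = (i0 : Int) - h_.length by omega]
      have : get_shell_alt h_ ((i0 : Int) - h_.length) ((f : Int)) = pvSeg h_ i0 f := by
        rw [← alt_eq_seg h_ hn i0 f hi0 hf]
        have hmm : PySem.Int.mod ((i0 : Int) - h_.length) (h_.length : Int)
            = PySem.Int.mod (i0 : Int) (h_.length : Int) := by
          rw [PySem.Int.mod_eq_emod_of_pos (by exact_mod_cast hn),
            PySem.Int.mod_eq_emod_of_pos (by exact_mod_cast hn),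
            show (i0 : Int) - h_.length = (i0 : Int) + (-1) * h_.length by ring,
            Int.add_mul_emod_self_right]
        simp only [get_shell_alt, hmm]
      rw [this]
  · -- ini = fim (possibly both negative): a single element
    subst heq
    obtain ⟨fuel', hfe⟩ : ∃ k, h_.length + 1 = k + 1 := ⟨h_.length, rfl⟩
    rw [hfe, pvLoopA, if_pos rfl]
    set j : Nat := (if 0 ≤ ini then ini else ini + h_.length).toNat with hjdef
    have hj : j < h_.length := by split_ifs at hjdef <;> omega
    rw [pyGet_norm h_ hn ini hlo hhi, ← hjdef]
    simp only [get_shell_alt]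
    rw [mod_norm h_.length hn ini hlo hhi,
      show (if 0 ≤ ini then ini else ini + h_.length) = (j : Int) by split_ifs at hjdef ⊢ <;> omega]
    rw [if_pos le_rfl,
      show (j : Int) + 1 = ((j + 1 : Nat) : Int) by push_cast; ring,
      PySem.List.slice_natCast, List.drop_eq_getElem_cons hj,
      show j + 1 - j = 1 by omega, List.take_succ_cons, List.take_zero, List.nil_append,
      List.getD_eq_getElem _ _ hj]
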